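-- pv_equiv track=rewrite | github.com/zharmad/fcc | scripts/calc_fcc_matrix.py | parse_chain_symmetries
-- ===== SOURCE A (Python) =====
-- def parse_chain_symmetries(chsymmstr):
--     """
--     Chain symmetry parsing routine.
--     Begin with a string describing the symmetry groups and methof of permutation.
--     Example for a dimer, and cyclic trimer: "AB,cDEF"
--     This function returns two list of lists:
--     (1) the group(s) interpreted from the string, and
--     (2) the list of all permutations for each sets.
--
--     Note that the first permutation must be identity for compatibility.
--
--     ~~TODO~~ Allow users to specify explicit permutations, e.g. "(ABCD,CDAB)"
--     """
--     import itertools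
--
--     # Parse string
--     grps=[] ; ll=[]
--     cyclic=[]; bCyclic=False
--     #bExplicit=False
--     for char in chsymmstr:
--         if char == ',':
--             #end group
--             if len(ll)>0:
--                 grps.append(ll)
--                 cyclic.append(bCyclic)
--             ll=[]
--             bCyclic=False
--         elif char == 'c':
--             #specify cyclic for this group.
--             bCyclic=True
--         else:
--             #add member to group
--             asc=ord(char)-64
--             ll.append(asc)
--     if len(ll)>0:
--         grps.append(ll)
--         cyclic.append(bCyclic)
--
--     #Generate permutations.
--     #First generate permutations from the chain symmetries above.
--     permutations=[]
--     for grp, cyclic in zip(grps,cyclic):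
--         if cyclic:
--             p = [ [grp[i-j] for i in range(len(grp))] for j in range(len(grp)) ]
--         else:
--             p = itertools.permutations(grp)
--         ll = [i for i in iter(p)]
--         permutations.append(ll)
--
--     return grps, permutations
-- ===== SOURCE B (Python) =====
-- def parse_chain_symmetries(chsymmstr):
--     """Split-on-comma reimplementation: tokenize with str.split, derive each
--     group and its cyclic flag from its token, then generate rotations via
--     slicing and full permutations via itertools."""
--     import itertools
--
--     grps = []
--     flags = []
--     for token in chsymmstr.split(','):
--         members = [ord(ch) - 64 for ch in token if ch != 'c']
--         if members:
--             grps.append(members)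
--             flags.append('c' in token)
--
--     permutations = []
--     for grp, cyc in zip(grps, flags):
--         if cyc:
--             n = len(grp)
--             permutations.append([grp[n - j:] + grp[:n - j] for j in range(n)])
--         else:
--             permutations.append(list(itertools.permutations(grp)))
--     return grps, permutations
-- ===== Notes on version B (the rewrite author's own statement) =====
-- stated objective: simpler
-- what changed: Replaces the char-by-char state machine (running group list, pending member list, pending cyclic flag, explicit flush at each separator and at end) by splitting the string into comma-separated tokens and deriving each group and its cyclic flag directly from its token, and builds cyclic rotations by list slicing instead of negative-index comprehensions.
import Mathlib
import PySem

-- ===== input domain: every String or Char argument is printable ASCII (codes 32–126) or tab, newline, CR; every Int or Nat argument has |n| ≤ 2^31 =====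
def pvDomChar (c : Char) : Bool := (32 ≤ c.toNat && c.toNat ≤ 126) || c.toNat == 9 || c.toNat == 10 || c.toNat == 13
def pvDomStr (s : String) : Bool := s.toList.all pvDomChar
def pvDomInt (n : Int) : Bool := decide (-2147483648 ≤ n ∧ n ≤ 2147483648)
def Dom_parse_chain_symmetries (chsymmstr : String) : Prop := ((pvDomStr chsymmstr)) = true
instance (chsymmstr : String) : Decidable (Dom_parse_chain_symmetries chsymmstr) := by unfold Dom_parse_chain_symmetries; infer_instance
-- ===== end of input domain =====

-- B replaces A's char-by-char state machine by split-on-comma token processing and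
-- builds cyclic rotations by slicing; the return value is proved identical on all inputs.

-- ===== PORT A =====
-- One step of A's character loop; state = (grps, ll, cyclic, bCyclic).
def pcsStep (st : List (List Int) × List Int × List Bool × Bool) (ch : Char) :
    List (List Int) × List Int × List Bool × Bool :=
  match st with
  | (grps, ll, cyclic, bCyclic) =>
    if ch = ',' then
      -- end group
      if 0 < ll.length then (grps ++ [ll], [], cyclic ++ [bCyclic], false)
      else (grps, [], cyclic, false)
    else if ch = 'c' then (grps, ll, cyclic, true)
    else (grps, ll ++ [((ch.toNat : Int) - 64)], cyclic, bCyclic)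

def parse_chain_symmetries (chsymmstr : String) : List (List Int) × List (List (List Int)) :=
  match chsymmstr.toList.foldl pcsStep ([], [], [], false) with
  | (grps, ll, cyclic, bCyclic) =>
    let grps := if 0 < ll.length then grps ++ [ll] else grps
    let cyclic := if 0 < ll.length then cyclic ++ [bCyclic] else cyclic
    let permutations := (grps.zip cyclic).map (fun gc =>
      if gc.2 then
        -- [ [grp[i-j] for i in range(len(grp))] for j in range(len(grp)) ]  (grp[i-j]: negative index wraps, always in range)
        (PySem.List.pyRange 0 (PySem.List.len gc.1) 1).map (fun j =>
          (PySem.List.pyRange 0 (PySem.List.len gc.1) 1).map (fun i => PySem.List.pyGetD gc.1 (i - j) 0))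
      else PySem.List.permutations gc.1 gc.1.length)
    (grps, permutations)

-- ===== PORT B =====
-- token -> (groups, flags) accumulation over the token list of chsymmstr.split(',')
def pcsAltCollect : List (List Char) → List (List Int) × List Bool
  | [] => ([], [])
  | t :: ts =>
    let members := (t.filter (fun c => c ≠ 'c')).map (fun c => ((c.toNat : Int) - 64))
    let rest := pcsAltCollect ts
    if members = [] then rest
    else (members :: rest.1, (t.contains 'c') :: rest.2)

def parse_chain_symmetries_alt (chsymmstr : String) : List (List Int) × List (List (List Int)) :=
  let gf := pcsAltCollect (PySem.Chars.splitOn chsymmstr.toList [','])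
  let permutations := (gf.1.zip gf.2).map (fun gc =>
    if gc.2 then
      -- [grp[n-j:] + grp[:n-j] for j in range(n)]
      (PySem.List.pyRange 0 (PySem.List.len gc.1) 1).map (fun j =>
        PySem.List.slice gc.1 (some ((PySem.List.len gc.1) - j)) none ++
        PySem.List.slice gc.1 none (some ((PySem.List.len gc.1) - j)))
    else PySem.List.permutations gc.1 gc.1.length)
  (gf.1, permutations)

-- ===== PRECONDITION & SPEC =====
def Spec_parse_chain_symmetries (chsymmstr : String) (out : List (List Int) × List (List (List Int))) : Prop := out = parse_chain_symmetries_alt chsymmstr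
instance (chsymmstr : String) (out : List (List Int) × List (List (List Int))) : Decidable (Spec_parse_chain_symmetries chsymmstr out) := by unfold Spec_parse_chain_symmetries; infer_instance

-- ===== CLAIM (what is proved, stated in full; the proofs are below) =====
def Claim_equal_parse_chain_symmetries : Prop := ∀ (chsymmstr : String), Dom_parse_chain_symmetries chsymmstr → Spec_parse_chain_symmetries chsymmstr (parse_chain_symmetries chsymmstr)

-- ===== LEMMAS AND PROOFS =====

def pvTok : List Char → List Char × List (List Char)
  | [] => ([], [])
  | c :: cs =>
    let r := pvTok cs
    if c = ',' then ([], r.1 :: r.2) else (c :: r.1, r.2)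

lemma pv_splitOn_go_comma (fuel : Nat) :
    ∀ (l cur : List Char) (acc : List (List Char)), l.length < fuel →
      PySem.Chars.splitOn.go [','] fuel l cur acc
        = acc.reverse ++ ((cur.reverse ++ (pvTok l).1) :: (pvTok l).2) := by
  induction fuel with
  | zero => intro l cur acc h; omega
  | succ n ih =>
    intro l cur acc h
    cases l with
    | nil => simp [PySem.Chars.splitOn.go, pvTok]
    | cons c rest =>
      by_cases hc : c = ','
      · subst hc
        rw [PySem.Chars.splitOn.go]
        simp only [List.isPrefixOf, BEq.rfl, Bool.and_eq_true, and_self, if_true,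
          List.length_cons, List.drop_succ_cons, List.drop_zero, List.length_nil]
        rw [ih rest [] _ (by simpa using Nat.lt_of_succ_lt_succ h)]
        simp [pvTok]
      · rw [PySem.Chars.splitOn.go]
        have hp : ([','].isPrefixOf (c :: rest)) = false := by
          simp [List.isPrefixOf]; exact fun hh => (hc hh.symm).elim
        rw [hp]
        simp only [Bool.false_eq_true, if_false]
        rw [ih rest (c :: cur) acc (by simpa using Nat.lt_of_succ_lt_succ h)]
        simp [pvTok, hc]

lemma pv_splitOn_comma (s : List Char) :
    PySem.Chars.splitOn s [','] = (pvTok s).1 :: (pvTok s).2 := by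
  unfold PySem.Chars.splitOn
  rw [pv_splitOn_go_comma (s.length + 1) s [] [] (Nat.lt_succ_self _)]
  simp

def pvBuildFrom (ll : List Int) (bC : Bool) (t : List Char) (ts : List (List Char)) :
    List (List Int) × List Bool :=
  let g := ll ++ (t.filter (fun c => c ≠ 'c')).map (fun c => ((c.toNat : Int) - 64))
  let rest := pcsAltCollect ts
  if g = [] then rest else (g :: rest.1, (bC || t.contains 'c') :: rest.2)

def pvFlush (st : List (List Int) × List Int × List Bool × Bool) : List (List Int) × List Bool :=
  ((if 0 < st.2.1.length then st.1 ++ [st.2.1] else st.1),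
   (if 0 < st.2.1.length then st.2.2.1 ++ [st.2.2.2] else st.2.2.1))

lemma pv_build_head (t : List Char) (ts : List (List Char)) :
    pcsAltCollect (t :: ts) = pvBuildFrom [] false t ts := by
  simp [pcsAltCollect, pvBuildFrom]

lemma pcsStep_comma (g : List (List Int)) (l : List Int) (c : List Bool) (b : Bool) :
    pcsStep (g, l, c, b) ',' =
      if 0 < l.length then (g ++ [l], [], c ++ [b], false) else (g, [], c, false) := by
  unfold pcsStep; simp only [reduceIte]

lemma pcsStep_c (g : List (List Int)) (l : List Int) (c : List Bool) (b : Bool) :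
    pcsStep (g, l, c, b) 'c' = (g, l, c, true) := by rfl

lemma pcsStep_other (g : List (List Int)) (l : List Int) (c : List Bool) (b : Bool)
    (ch : Char) (hc : ch ≠ ',') (hcc : ch ≠ 'c') :
    pcsStep (g, l, c, b) ch = (g, l ++ [((ch.toNat : Int) - 64)], c, b) := by
  unfold pcsStep; simp only [if_neg hc, if_neg hcc]

set_option maxRecDepth 8192 in
lemma pv_foldlA (cs : List Char) :
    ∀ (grps : List (List Int)) (ll : List Int) (cyc : List Bool) (bC : Bool),
      pvFlush (cs.foldl pcsStep (grps, ll, cyc, bC))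
        = (grps ++ (pvBuildFrom ll bC (pvTok cs).1 (pvTok cs).2).1,
           cyc ++ (pvBuildFrom ll bC (pvTok cs).1 (pvTok cs).2).2) := by
  induction cs with
  | nil =>
    intro grps ll cyc bC
    simp only [List.foldl_nil, pvFlush, pvTok, pvBuildFrom, List.filter_nil, List.map_nil,
      List.append_nil, pcsAltCollect]
    by_cases hll : ll = []
    · subst hll; simp
    · simp [hll, List.length_pos_iff.mpr hll]
  | cons c cs ih =>
    intro grps ll cyc bC
    by_cases hc : c = ','
    · subst hc
      rw [List.foldl_cons, pcsStep_comma]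
      have hpv : pvTok (',' :: cs) = ([], (pvTok cs).1 :: (pvTok cs).2) := by simp [pvTok]
      rw [hpv]
      by_cases hll : ll = []
      · subst hll
        rw [if_neg (by simp)]
        rw [ih]
        simp [pvBuildFrom, pv_build_head]
      · rw [if_pos (List.length_pos_iff.mpr hll)]
        rw [ih]
        simp only [pvBuildFrom, List.filter_nil, List.map_nil, List.append_nil, if_neg hll,
          pv_build_head]
        simp only [List.contains_nil, Bool.or_false, List.append_assoc, List.singleton_append]
    · by_cases hcc : c = 'c'
      · subst hcc
        rw [List.foldl_cons, pcsStep_c, ih]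
        have hpv : pvTok ('c' :: cs) = ('c' :: (pvTok cs).1, (pvTok cs).2) := by
          simp [pvTok]
        rw [hpv]
        simp [pvBuildFrom]
      · rw [List.foldl_cons, pcsStep_other _ _ _ _ _ hc hcc, ih]
        have hpv : pvTok (c :: cs) = (c :: (pvTok cs).1, (pvTok cs).2) := by
          simp [pvTok, hc]
        rw [hpv]
        have hcc' : ¬ ('c' = c) := fun h => hcc h.symm
        simp [pvBuildFrom, hcc, hcc']

lemma pv_rot_inner (g : List Int) (j : Int) (hj0 : 0 ≤ j) (hjn : j < (g.length : Int)) :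
    (PySem.List.pyRange 0 (PySem.List.len g) 1).map (fun i => PySem.List.pyGetD g (i - j) 0)
      = PySem.List.slice g (some ((PySem.List.len g) - j)) none ++
        PySem.List.slice g none (some ((PySem.List.len g) - j)) := by
  rw [PySem.List.slice_from g (by simp [PySem.List.len_eq]; omega),
      PySem.List.slice_to g (by simp [PySem.List.len_eq]; omega)]
  rw [PySem.List.len_eq, PySem.List.pyRange_zero, Int.toNat_natCast, List.map_map]
  have hm : ((g.length : Int) - j).toNat = g.length - j.toNat := by omega
  rw [hm]
  apply List.ext_getElem
  · simp
  · intro i hi hi'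
    simp only [List.getElem_map, List.getElem_range, Function.comp_apply]
    simp only [List.length_map, List.length_range] at hi
    by_cases hcase : i < j.toNat
    · have hk : (i : Int) - j = -(((j.toNat - i : Nat)) : Int) := by omega
      rw [hk, PySem.List.pyGetD_neg_natCast g _ 0 (by omega) (by omega)]
      rw [List.getElem_append_left (by simp; omega)]
      simp only [List.getElem_drop]
      congr 1
      omega
    · have hk : (i : Int) - j = (((i - j.toNat : Nat)) : Int) := by omega
      rw [hk, PySem.List.pyGetD_natCast]
      rw [List.getElem_append_right (by simp; omega)]
      simp only [List.getElem_take, List.length_drop]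
      rw [List.getD_eq_getElem g 0 (by omega)]
      congr 1
      omega

lemma pv_rot (g : List Int) :
    (PySem.List.pyRange 0 (PySem.List.len g) 1).map (fun j =>
        (PySem.List.pyRange 0 (PySem.List.len g) 1).map (fun i => PySem.List.pyGetD g (i - j) 0))
      = (PySem.List.pyRange 0 (PySem.List.len g) 1).map (fun j =>
        PySem.List.slice g (some ((PySem.List.len g) - j)) none ++
        PySem.List.slice g none (some ((PySem.List.len g) - j))) := by
  apply List.map_congr_left
  intro j hj
  rw [PySem.List.mem_pyRange_one] at hj
  exact pv_rot_inner g j hj.1 (by simpa [PySem.List.len_eq] using hj.2)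

-- ===== VERDICT (by name: the statement is the Claim_ definition above) =====
theorem parse_chain_symmetries_spec : Claim_equal_parse_chain_symmetries := by
  intro s _
  unfold Spec_parse_chain_symmetries
  unfold parse_chain_symmetries parse_chain_symmetries_alt
  have h := pv_foldlA s.toList [] [] [] false
  rcases hfold : s.toList.foldl pcsStep ([], [], [], false) with ⟨g, l, c, b⟩
  rw [hfold] at h
  simp only [pvFlush, List.nil_append] at h
  have h1 := congrArg Prod.fst h
  have h2 := congrArg Prod.snd h
  simp only at h1 h2
  dsimp only
  rw [pv_splitOn_comma, pv_build_head, h1, h2]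
  refine Prod.ext rfl ?_
  apply List.map_congr_left
  intro gc _
  by_cases hcyc : gc.2
  · simp only [hcyc, if_true]
    exact pv_rot gc.1
  · simp [hcyc]
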